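-- pv_equiv track=rewrite | github.com/miguellucero123/METGO_3D_Quillota_60GB | respaldo_20251011_022103/01_Sistema_Meteorologico/dashboards/dashboard_meteorologico_avanzado.py | calcular_dias_secos_consecutivos
-- ===== SOURCE A (Python) =====
-- def calcular_dias_secos_consecutivos(precipitacion):
--     """Calcular días secos consecutivos"""
--     dias_secos = 0
--     for precip in reversed(precipitacion):
--         if precip == 0:
--             dias_secos += 1
--         else:
--             break
--     return f"{dias_secos} días"
-- ===== SOURCE B (Python) =====
-- def calcular_dias_secos_consecutivos(precipitacion):
--     """Calcular días secos consecutivos"""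
--     racha = 0
--     for precip in precipitacion:
--         racha = racha + 1 if precip == 0 else 0
--     return f"{racha} días"
-- ===== Notes on version B (the rewrite author's own statement) =====
-- stated objective: alternative
-- what changed: Forward single pass with a counter that resets on non-zero values, instead of a reverse scan with an early break.
import Mathlib
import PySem

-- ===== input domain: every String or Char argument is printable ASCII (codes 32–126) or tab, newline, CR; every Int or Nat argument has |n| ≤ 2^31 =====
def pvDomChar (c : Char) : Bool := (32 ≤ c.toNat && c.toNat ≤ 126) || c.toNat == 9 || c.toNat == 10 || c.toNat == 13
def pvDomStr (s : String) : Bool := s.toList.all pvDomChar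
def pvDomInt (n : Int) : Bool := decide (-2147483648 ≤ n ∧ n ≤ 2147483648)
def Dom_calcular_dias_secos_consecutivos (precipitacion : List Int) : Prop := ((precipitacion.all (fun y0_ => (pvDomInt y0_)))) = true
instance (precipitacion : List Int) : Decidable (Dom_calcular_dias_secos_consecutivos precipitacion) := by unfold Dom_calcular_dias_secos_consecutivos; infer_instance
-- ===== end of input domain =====

-- B replaces A's reverse scan with early break by a forward pass with a reset counter (alternative decomposition, same result).

-- ===== PORT A =====
-- A's loop over reversed(precipitacion), counting zeros until the first non-zero (break).
def pvCountA : List Int → Int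
  | [] => 0
  | p :: rest => if p = 0 then pvCountA rest + 1 else 0

def calcular_dias_secos_consecutivos (precipitacion : List Int) : String :=
  PySem.Int.toStr (pvCountA precipitacion.reverse) ++ " días"

-- ===== PORT B =====
def calcular_dias_secos_consecutivos_alt (precipitacion : List Int) : String :=
  PySem.Int.toStr (precipitacion.foldl (fun racha p => if p = 0 then racha + 1 else 0) 0) ++ " días"

-- ===== PRECONDITION & SPEC =====
def Spec_calcular_dias_secos_consecutivos (precipitacion : List Int) (out : String) : Prop := out = calcular_dias_secos_consecutivos_alt precipitacion
instance (precipitacion : List Int) (out : String) : Decidable (Spec_calcular_dias_secos_consecutivos precipitacion out) := by unfold Spec_calcular_dias_secos_consecutivos; infer_instance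

-- ===== CLAIM (what is proved, stated in full; the proofs are below) =====
def Claim_equal_calcular_dias_secos_consecutivos : Prop := ∀ (precipitacion : List Int), Dom_calcular_dias_secos_consecutivos precipitacion → Spec_calcular_dias_secos_consecutivos precipitacion (calcular_dias_secos_consecutivos precipitacion)

-- ===== LEMMAS AND PROOFS =====
theorem pvCount_eq (l : List Int) :
    pvCountA l.reverse = l.foldl (fun racha p => if p = 0 then racha + 1 else 0) 0 := by
  induction l using List.reverseRecOn with
  | nil => simp [pvCountA]
  | append_singleton l a ih =>
    simp [List.foldl_append, pvCountA, ← ih]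

-- ===== VERDICT (by name: the statement is the Claim_ definition above) =====
theorem calcular_dias_secos_consecutivos_spec : Claim_equal_calcular_dias_secos_consecutivos := by
  intro l _
  unfold Spec_calcular_dias_secos_consecutivos calcular_dias_secos_consecutivos calcular_dias_secos_consecutivos_alt
  rw [pvCount_eq]
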